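-- pv_equiv track=rewrite | github.com/FANOOJungjieun/CodingTest | 프로그래머스_파괴되지 않은 건물.py | solution
-- ===== SOURCE A (Python) =====
-- def solution(board, skill):
--     answer = 0
--     #2차원 누적합
--     d = [[0] * (len(board[0]) + 1) for _ in range(len(board) + 1)]
--
--     for type, r1, c1, r2, c2, degree in skill:
--         d[r1][c1] += degree if type == 2 else -degree
--         d[r1][c2+1] += -degree if type == 2 else degree
--         d[r2+1][c1] += -degree if type == 2 else degree # 플마제로로 만들어야 하니 반대부호
--         d[r2+1][c2+1] += degree if type == 2 else -degree
--
--     #행 누적합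
--     for i in range(len(d)-1):
--         for j in range(len(d[0]) - 1):
--             d[i][j+1] += d[i][j]
--
--     #열 누적합
--     for j in range(len(d[0])-1):
--         for i in range(len(d)-1):
--             d[i+1][j] += d[i][j]
--
--     for i in range(len(board)):
--         for j in range(len(board[0])):
--             if board[i][j] + d[i][j] > 0:
--                 answer += 1
--     return answer
-- ===== SOURCE B (Python) =====
-- def solution(board, skill):
--     n, m = len(board), len(board[0])
--     signed = [((deg if t == 2 else -deg), r1, c1, r2, c2)
--               for t, r1, c1, r2, c2, deg in skill]
--     count = 0
--     for i in range(n):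
--         for j in range(m):
--             total = board[i][j]
--             for s, r1, c1, r2, c2 in signed:
--                 if r1 <= i <= r2 and c1 <= j <= c2:
--                     total += s
--             if total > 0:
--                 count += 1
--     return count
-- ===== Notes on version B (the rewrite author's own statement) =====
-- stated objective: simpler
-- what changed: A builds a 2D difference grid and runs two prefix-sum passes; B drops the grid entirely and, for each cell, directly sums the signed degrees of the skills whose rectangle covers it, then counts positives.
-- outside the precondition, e.g. on solution([[1], [-1]], [[1, 2, 0, 0, 0, 5]]): A returns 2, B returns 1; on solution([[-1]], [[1, -1, 0, -1, 0, 5]]): A returns 1, B returns 0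
import Mathlib
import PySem

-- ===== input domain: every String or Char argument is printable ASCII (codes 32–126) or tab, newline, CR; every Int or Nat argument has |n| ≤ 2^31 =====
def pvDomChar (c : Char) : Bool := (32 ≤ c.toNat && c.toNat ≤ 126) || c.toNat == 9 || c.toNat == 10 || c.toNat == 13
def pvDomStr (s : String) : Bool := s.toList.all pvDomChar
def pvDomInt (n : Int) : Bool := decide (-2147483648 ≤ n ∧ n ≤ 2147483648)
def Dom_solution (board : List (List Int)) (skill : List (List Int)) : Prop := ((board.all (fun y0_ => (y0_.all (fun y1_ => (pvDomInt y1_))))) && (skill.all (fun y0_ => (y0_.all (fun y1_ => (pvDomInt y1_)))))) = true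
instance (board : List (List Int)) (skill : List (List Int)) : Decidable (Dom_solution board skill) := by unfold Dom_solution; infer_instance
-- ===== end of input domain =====

-- B replaces A's 2D difference grid + two prefix-sum passes by a direct per-cell sum of the
-- signed degrees of the covering skills (simpler, no mutable grid; equivalence on return value).

-- ===== PORT A =====
-- d[i][j]
def pvGet2 (d : List (List Int)) (i j : Int) : Int :=
  PySem.List.pyGetD (PySem.List.pyGetD d i []) j 0
-- d[i][j] += v
def pvAdd2 (d : List (List Int)) (i j v : Int) : List (List Int) :=
  PySem.List.pySetD d i
    (PySem.List.pySetD (PySem.List.pyGetD d i []) j (pvGet2 d i j + v))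
-- the body of A's first loop: the four signed corner updates of one skill
def pvApplySkill (d : List (List Int)) (sk : List Int) : List (List Int) :=
  match sk with
  | [t, r1, c1, r2, c2, deg] =>
    let d := pvAdd2 d r1 c1 (if t == 2 then deg else -deg)
    let d := pvAdd2 d r1 (c2 + 1) (if t == 2 then -deg else deg)
    let d := pvAdd2 d (r2 + 1) c1 (if t == 2 then -deg else deg)
    pvAdd2 d (r2 + 1) (c2 + 1) (if t == 2 then deg else -deg)
  | _ => d  -- Python raises on unpacking a row that is not 6 long; Pre_ excludes those

def solution (board : List (List Int)) (skill : List (List Int)) : Int :=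
  let d0 : List (List Int) :=
    List.replicate (board.length + 1)
      (List.replicate ((PySem.List.pyGetD board 0 []).length + 1) (0 : Int))
  let d1 := skill.foldl pvApplySkill d0
  -- 행 누적합 (row prefix sums)
  let d2 := (PySem.List.pyRange 0 ((d1.length : Int) - 1) 1).foldl (fun d i =>
      (PySem.List.pyRange 0 (((PySem.List.pyGetD d 0 []).length : Int) - 1) 1).foldl
        (fun d j => pvAdd2 d i (j + 1) (pvGet2 d i j)) d) d1
  -- 열 누적합 (column prefix sums)
  let d3 := (PySem.List.pyRange 0 (((PySem.List.pyGetD d2 0 []).length : Int) - 1) 1).foldl (fun d j =>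
      (PySem.List.pyRange 0 ((d.length : Int) - 1) 1).foldl
        (fun d i => pvAdd2 d (i + 1) j (pvGet2 d i j)) d) d2
  (PySem.List.pyRange 0 (board.length : Int) 1).foldl (fun answer i =>
    (PySem.List.pyRange 0 ((PySem.List.pyGetD board 0 []).length : Int) 1).foldl (fun answer j =>
      if PySem.List.pyGetD (PySem.List.pyGetD board i []) j 0 + pvGet2 d3 i j > 0
      then answer + 1 else answer) answer) 0

-- ===== PORT B =====
def pvSigned (sk : List Int) : Int × Int × Int × Int × Int :=
  match sk with
  | [t, r1, c1, r2, c2, deg] => ((if t == 2 then deg else -deg), r1, c1, r2, c2)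
  | _ => (0, 0, 0, -1, -1)  -- Python raises on unpacking; Pre_ excludes those rows

def solution_alt (board : List (List Int)) (skill : List (List Int)) : Int :=
  let n := (board.length : Int)
  let m := ((PySem.List.pyGetD board 0 []).length : Int)
  let signed := skill.map pvSigned
  (PySem.List.pyRange 0 n 1).foldl (fun count i =>
    (PySem.List.pyRange 0 m 1).foldl (fun count j =>
      let total := signed.foldl (fun tot q =>
        if q.2.1 ≤ i ∧ i ≤ q.2.2.2.1 ∧ q.2.2.1 ≤ j ∧ j ≤ q.2.2.2.2
        then tot + q.1 else tot)
        (PySem.List.pyGetD (PySem.List.pyGetD board i []) j 0)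
      if total > 0 then count + 1 else count) count) 0

-- ===== PRECONDITION & SPEC =====
-- Besides the inputs where A raises (empty board, a row shorter than board[0], a skill row not of
-- length 6, indices past the difference grid), Pre_ excludes skills with an inverted rectangle
-- (r1 > r2 or c1 > c2) or negative (wrapped) indices: such skills are outside the problem's
-- contract and A's difference-grid value and B's direct-scan value are two equally unspecified
-- readings of them, so neither is the one to match.
def Pre_solution (board : List (List Int)) (skill : List (List Int)) : Prop :=
  board ≠ [] ∧
  (∀ row ∈ board, (board.headD []).length ≤ row.length) ∧
  (∀ sk ∈ skill, sk.length = 6 ∧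
    0 ≤ sk.getD 1 0 ∧ sk.getD 1 0 ≤ sk.getD 3 0 ∧ sk.getD 3 0 < (board.length : Int) ∧
    0 ≤ sk.getD 2 0 ∧ sk.getD 2 0 ≤ sk.getD 4 0 ∧ sk.getD 4 0 < ((board.headD []).length : Int))
instance (board : List (List Int)) (skill : List (List Int)) : Decidable (Pre_solution board skill) := by
  unfold Pre_solution; infer_instance

def pvWitness_solution : List (List Int) × List (List Int) :=
  ([[1, -2], [3, 4]], [[1, 0, 0, 1, 1, 2], [2, 0, 0, 0, 0, 5]])

def Spec_solution (board : List (List Int)) (skill : List (List Int)) (out : Int) : Prop := out = solution_alt board skill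
instance (board : List (List Int)) (skill : List (List Int)) (out : Int) : Decidable (Spec_solution board skill out) := by unfold Spec_solution; infer_instance

-- ===== CLAIM (what is proved, stated in full; the proofs are below) =====
def Claim_equal_solution : Prop := ∀ (board : List (List Int)) (skill : List (List Int)), Dom_solution board skill → Pre_solution board skill → Spec_solution board skill (solution board skill)



-- ===== LEMMAS AND PROOFS =====

-- grid read with Nat indices (out-of-range reads give 0 / [])
def pvG (d : List (List Int)) (i j : Nat) : Int := (d.getD i []).getD j 0

def pvShape (d : List (List Int)) (N M : Nat) : Prop :=
  d.length = N ∧ ∀ row ∈ d, row.length = M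

-- per-skill bounds of Pre_, in the (n, m) form the lemmas use
def pvSkOK (sk : List Int) (n m : Nat) : Prop :=
  sk.length = 6 ∧
  0 ≤ sk.getD 1 0 ∧ sk.getD 1 0 ≤ sk.getD 3 0 ∧ sk.getD 3 0 < (n : Int) ∧
  0 ≤ sk.getD 2 0 ∧ sk.getD 2 0 ≤ sk.getD 4 0 ∧ sk.getD 4 0 < (m : Int)

-- the four-corner delta one skill writes into A's difference grid, at cell (i, j)
def pvFour (sk : List Int) (i j : Nat) : Int :=
  match sk with
  | [t, r1, c1, r2, c2, deg] =>
    (if t == 2 then deg else -deg) *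
      ((if (i : Int) = r1 then 1 else 0) - (if (i : Int) = r2 + 1 then 1 else 0)) *
      ((if (j : Int) = c1 then 1 else 0) - (if (j : Int) = c2 + 1 then 1 else 0))
  | _ => 0

-- the contribution B's inner loop adds for one skill at cell (i, j)
def pvRect (sk : List Int) (i j : Int) : Int :=
  (fun q : Int × Int × Int × Int × Int =>
    if q.2.1 ≤ i ∧ i ≤ q.2.2.2.1 ∧ q.2.2.1 ≤ j ∧ j ≤ q.2.2.2.2
    then q.1 else 0) (pvSigned sk)

theorem pvG_set (d : List (List Int)) (a : Nat) (row : List Int) (i j : Nat) :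
    pvG (d.set a row) i j = if i = a ∧ a < d.length then row.getD j 0 else pvG d i j := by
  simp only [pvG, List.getD_eq_getElem?_getD, List.getElem?_set]
  by_cases h1 : a = i
  · subst h1
    by_cases h2 : a < d.length
    · simp [h2]
    · have hnone : d[a]? = none := List.getElem?_eq_none (by omega)
      simp [h2, hnone]
  · rw [if_neg h1, if_neg (by omega : ¬ (i = a ∧ a < d.length))]

theorem pvShape_set (d : List (List Int)) (a : Nat) (row : List Int) (N M : Nat)
    (hd : pvShape d N M) (hrow : row.length = M) : pvShape (d.set a row) N M := by
  refine ⟨by simpa using hd.1, fun r hr => ?_⟩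
  rcases List.mem_or_eq_of_mem_set hr with h | h
  · exact hd.2 r h
  · subst h; exact hrow

theorem pvRow_len (d : List (List Int)) (N M : Nat) (hd : pvShape d N M)
    (a : Nat) (ha : a < N) : (d.getD a []).length = M := by
  obtain ⟨hL, hmem⟩ := hd
  have hlt : a < d.length := by omega
  rw [List.getD_eq_getElem?_getD, List.getElem?_eq_getElem hlt, Option.getD_some]
  exact hmem _ (List.getElem_mem hlt)

theorem pvGet2_eq (d : List (List Int)) (i j : Int) (hi : 0 ≤ i) (hj : 0 ≤ j) :
    pvGet2 d i j = pvG d i.toNat j.toNat := by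
  unfold pvGet2 pvG
  rw [PySem.List.pyGetD_of_nonneg d [] hi, PySem.List.pyGetD_of_nonneg _ 0 hj]

theorem pvAdd2_eq (d : List (List Int)) (a b v : Int) (ha : 0 ≤ a) (hb : 0 ≤ b) :
    pvAdd2 d a b v =
      d.set a.toNat ((d.getD a.toNat []).set b.toNat (pvG d a.toNat b.toNat + v)) := by
  unfold pvAdd2
  rw [pvGet2_eq d a b ha hb, PySem.List.pyGetD_of_nonneg d [] ha,
    PySem.List.pySetD_of_nonneg _ _ hb, PySem.List.pySetD_of_nonneg _ _ ha]

theorem pvAdd2_shape (d : List (List Int)) (N M : Nat) (hd : pvShape d N M)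
    (a b v : Int) (ha : 0 ≤ a) (ha' : a < (N : Int)) (hb : 0 ≤ b) (hb' : b < (M : Int)) :
    pvShape (pvAdd2 d a b v) N M := by
  rw [pvAdd2_eq d a b v ha hb]
  refine pvShape_set _ _ _ _ _ hd ?_
  rw [List.length_set]
  exact pvRow_len d N M hd a.toNat (by omega)

theorem pvAdd2_get (d : List (List Int)) (N M : Nat) (hd : pvShape d N M)
    (a b v : Int) (ha : 0 ≤ a) (ha' : a < (N : Int)) (hb : 0 ≤ b) (hb' : b < (M : Int))
    (i j : Nat) :
    pvG (pvAdd2 d a b v) i j = pvG d i j + (if (i : Int) = a ∧ (j : Int) = b then v else 0) := by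
  have hL := hd.1
  have hrl : (d.getD a.toNat []).length = M := pvRow_len d N M hd a.toNat (by omega)
  rw [pvAdd2_eq d a b v ha hb, pvG_set]
  by_cases h1 : i = a.toNat ∧ a.toNat < d.length
  · obtain ⟨rfl, _⟩ := h1
    rw [if_pos ⟨rfl, by omega⟩]
    rw [List.getD_eq_getElem?_getD, List.getElem?_set]
    by_cases h2 : j = b.toNat
    · subst h2
      rw [if_pos rfl, if_pos (by omega : b.toNat < (d.getD a.toNat []).length),
        if_pos (show ((a.toNat : Nat) : Int) = a ∧ ((b.toNat : Nat) : Int) = b by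
          constructor <;> omega)]
      simp
    · rw [if_neg (by omega : ¬ b.toNat = j),
        if_neg (by omega : ¬ (((a.toNat : Nat) : Int) = a ∧ ((j : Nat) : Int) = b))]
      simp [pvG, List.getD_eq_getElem?_getD]
  · rw [if_neg h1, if_neg (by omega : ¬ ((i : Int) = a ∧ (j : Int) = b))]
    ring

theorem pvApplySkill_shape (d : List (List Int)) (n m : Nat) (sk : List Int)
    (hd : pvShape d (n + 1) (m + 1)) (hsk : pvSkOK sk n m) :
    pvShape (pvApplySkill d sk) (n + 1) (m + 1) := by
  obtain ⟨hlen, h1, h2, h3, h4, h5, h6⟩ := hsk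
  match sk, hlen with
  | [t, r1, c1, r2, c2, deg], _ =>
    rw [show [t, r1, c1, r2, c2, deg].getD 1 0 = r1 from rfl] at h1 h2
    rw [show [t, r1, c1, r2, c2, deg].getD 3 0 = r2 from rfl] at h2 h3
    rw [show [t, r1, c1, r2, c2, deg].getD 2 0 = c1 from rfl] at h4 h5
    rw [show [t, r1, c1, r2, c2, deg].getD 4 0 = c2 from rfl] at h5 h6
    simp only [pvApplySkill]
    have s1 := pvAdd2_shape d _ _ hd r1 c1 (if t == 2 then deg else -deg)
      (by omega) (by omega) (by omega) (by omega)
    have s2 := pvAdd2_shape _ _ _ s1 r1 (c2 + 1) (if t == 2 then -deg else deg)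
      (by omega) (by omega) (by omega) (by omega)
    have s3 := pvAdd2_shape _ _ _ s2 (r2 + 1) c1 (if t == 2 then -deg else deg)
      (by omega) (by omega) (by omega) (by omega)
    exact pvAdd2_shape _ _ _ s3 (r2 + 1) (c2 + 1) (if t == 2 then deg else -deg)
      (by omega) (by omega) (by omega) (by omega)

set_option maxHeartbeats 2000000 in
theorem pvApplySkill_get (d : List (List Int)) (n m : Nat) (sk : List Int)
    (hd : pvShape d (n + 1) (m + 1)) (hsk : pvSkOK sk n m) (i j : Nat) :
    pvG (pvApplySkill d sk) i j = pvG d i j + pvFour sk i j := by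
  obtain ⟨hlen, h1, h2, h3, h4, h5, h6⟩ := hsk
  match sk, hlen with
  | [t, r1, c1, r2, c2, deg], _ =>
    rw [show [t, r1, c1, r2, c2, deg].getD 1 0 = r1 from rfl] at h1 h2
    rw [show [t, r1, c1, r2, c2, deg].getD 3 0 = r2 from rfl] at h2 h3
    rw [show [t, r1, c1, r2, c2, deg].getD 2 0 = c1 from rfl] at h4 h5
    rw [show [t, r1, c1, r2, c2, deg].getD 4 0 = c2 from rfl] at h5 h6
    simp only [pvApplySkill, pvFour]
    have s1 := pvAdd2_shape d _ _ hd r1 c1 (if t == 2 then deg else -deg)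
      (by omega) (by omega) (by omega) (by omega)
    have s2 := pvAdd2_shape _ _ _ s1 r1 (c2 + 1) (if t == 2 then -deg else deg)
      (by omega) (by omega) (by omega) (by omega)
    have s3 := pvAdd2_shape _ _ _ s2 (r2 + 1) c1 (if t == 2 then -deg else deg)
      (by omega) (by omega) (by omega) (by omega)
    rw [pvAdd2_get _ _ _ s3 (r2 + 1) (c2 + 1) (if t == 2 then deg else -deg)
      (by omega) (by omega) (by omega) (by omega) i j]
    rw [pvAdd2_get _ _ _ s2 (r2 + 1) c1 (if t == 2 then -deg else deg)
      (by omega) (by omega) (by omega) (by omega) i j]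
    rw [pvAdd2_get _ _ _ s1 r1 (c2 + 1) (if t == 2 then -deg else deg)
      (by omega) (by omega) (by omega) (by omega) i j]
    rw [pvAdd2_get _ _ _ hd r1 c1 (if t == 2 then deg else -deg)
      (by omega) (by omega) (by omega) (by omega) i j]
    split_ifs <;> (try ring) <;> (exfalso; omega)

theorem pvFold_skill (skill : List (List Int)) (n m : Nat)
    (hsk : ∀ sk ∈ skill, pvSkOK sk n m) (d : List (List Int))
    (hd : pvShape d (n + 1) (m + 1)) :
    pvShape (skill.foldl pvApplySkill d) (n + 1) (m + 1) ∧
    ∀ i j : Nat, pvG (skill.foldl pvApplySkill d) i j =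
      pvG d i j + (skill.map (fun sk => pvFour sk i j)).sum := by
  induction skill generalizing d with
  | nil => exact ⟨hd, by simp⟩
  | cons a l ih =>
    have ha := hsk a (by simp)
    have hd' := pvApplySkill_shape d n m a hd ha
    obtain ⟨hs, hg⟩ := ih (fun sk h => hsk sk (List.mem_cons_of_mem a h)) _ hd'
    refine ⟨hs, fun i j => ?_⟩
    simp only [List.foldl_cons, List.map_cons, List.sum_cons]
    rw [hg i j, pvApplySkill_get d n m a hd ha i j]
    ring

-- the inner loop of A's row-prefix pass, for a fixed row index i
theorem pvRowIn_get (n m : Nat) (i : Int) (hi : 0 ≤ i) (hi' : i < (n : Int) + 1)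
    (k : Nat) (hk : k ≤ m) (d : List (List Int)) (hd : pvShape d (n + 1) (m + 1)) :
    pvShape ((PySem.List.pyRange 0 (k : Int) 1).foldl
      (fun d j => pvAdd2 d i (j + 1) (pvGet2 d i j)) d) (n + 1) (m + 1) ∧
    ∀ i' j' : Nat, pvG ((PySem.List.pyRange 0 (k : Int) 1).foldl
      (fun d j => pvAdd2 d i (j + 1) (pvGet2 d i j)) d) i' j' =
      if i' = i.toNat ∧ j' ≤ k then ∑ t ∈ Finset.range (j' + 1), pvG d i.toNat t
      else pvG d i' j' := by
  induction k with
  | zero =>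
    simp only [Nat.cast_zero]
    rw [PySem.List.pyRange_one_eq_nil (le_refl (0 : Int))]
    refine ⟨hd, fun i' j' => ?_⟩
    simp only [List.foldl_nil]
    split_ifs with h
    · obtain ⟨rfl, hj⟩ := h
      have hj0 : j' = 0 := by omega
      subst hj0
      simp
    · rfl
  | succ k ihk =>
    obtain ⟨ihs, ihg⟩ := ihk (by omega)
    rw [show (((k + 1 : Nat)) : Int) = (k : Int) + 1 by push_cast; ring,
      PySem.List.pyRange_one_succ_right (by omega : (0 : Int) ≤ (k : Int)),
      List.foldl_append]
    set D := (PySem.List.pyRange 0 (k : Int) 1).foldl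
      (fun d j => pvAdd2 d i (j + 1) (pvGet2 d i j)) d with hD
    simp only [List.foldl_cons, List.foldl_nil]
    have hget : pvGet2 D i (k : Int) = pvG D i.toNat k := by
      have := pvGet2_eq D i (k : Int) hi (by omega)
      simpa using this
    have hsh : pvShape (pvAdd2 D i ((k : Int) + 1) (pvGet2 D i (k : Int))) (n + 1) (m + 1) :=
      pvAdd2_shape D _ _ ihs i ((k : Int) + 1) _ hi (by omega) (by omega) (by omega)
    refine ⟨hsh, fun i' j' => ?_⟩
    rw [pvAdd2_get D _ _ ihs i ((k : Int) + 1) _ hi (by omega) (by omega) (by omega) i' j']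
    have hval : pvG D i.toNat k = ∑ t ∈ Finset.range (k + 1), pvG d i.toNat t := by
      rw [ihg i.toNat k, if_pos (show i.toNat = i.toNat ∧ k ≤ k from ⟨rfl, le_refl k⟩)]
    rw [hget, hval, ihg i' j']
    by_cases hi'' : i' = i.toNat
    · by_cases hj1 : j' = k + 1
      · rw [if_neg (by omega : ¬ (i' = i.toNat ∧ j' ≤ k)),
          if_pos (show ((i' : Nat) : Int) = i ∧ ((j' : Nat) : Int) = (k : Int) + 1 by
            constructor <;> omega),
          if_pos (show i' = i.toNat ∧ j' ≤ k + 1 by omega),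
          hi'', hj1,
          show ∑ t ∈ Finset.range (k + 1 + 1), pvG d i.toNat t =
              (∑ t ∈ Finset.range (k + 1), pvG d i.toNat t) + pvG d i.toNat (k + 1)
            from Finset.sum_range_succ _ _]
        ring
      · by_cases hj2 : j' ≤ k
        · rw [if_pos (show i' = i.toNat ∧ j' ≤ k from ⟨hi'', hj2⟩),
            if_pos (show i' = i.toNat ∧ j' ≤ k + 1 by omega),
            if_neg (by omega : ¬ (((i' : Nat) : Int) = i ∧ ((j' : Nat) : Int) = (k : Int) + 1))]
          ring
        · rw [if_neg (by omega : ¬ (i' = i.toNat ∧ j' ≤ k)),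
            if_neg (by omega : ¬ (i' = i.toNat ∧ j' ≤ k + 1)),
            if_neg (by omega : ¬ (((i' : Nat) : Int) = i ∧ ((j' : Nat) : Int) = (k : Int) + 1))]
          ring
    · rw [if_neg (by omega : ¬ (i' = i.toNat ∧ j' ≤ k)),
        if_neg (by omega : ¬ (i' = i.toNat ∧ j' ≤ k + 1)),
        if_neg (by omega : ¬ (((i' : Nat) : Int) = i ∧ ((j' : Nat) : Int) = (k : Int) + 1))]
      ring

-- the outer loop of A's row-prefix pass: rows 0..k-1 become row-prefix sums
theorem pvRowOut_get (n m : Nat) (k : Nat) (hk : k ≤ n) (d : List (List Int))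
    (hd : pvShape d (n + 1) (m + 1)) :
    pvShape ((PySem.List.pyRange 0 (k : Int) 1).foldl (fun d i =>
      (PySem.List.pyRange 0 (((PySem.List.pyGetD d 0 []).length : Int) - 1) 1).foldl
        (fun d j => pvAdd2 d i (j + 1) (pvGet2 d i j)) d) d) (n + 1) (m + 1) ∧
    ∀ i' j' : Nat, pvG ((PySem.List.pyRange 0 (k : Int) 1).foldl (fun d i =>
      (PySem.List.pyRange 0 (((PySem.List.pyGetD d 0 []).length : Int) - 1) 1).foldl
        (fun d j => pvAdd2 d i (j + 1) (pvGet2 d i j)) d) d) i' j' =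
      if i' < k ∧ j' ≤ m then ∑ t ∈ Finset.range (j' + 1), pvG d i' t
      else pvG d i' j' := by
  induction k with
  | zero =>
    simp only [Nat.cast_zero]
    rw [PySem.List.pyRange_one_eq_nil (le_refl (0 : Int))]
    refine ⟨hd, fun i' j' => ?_⟩
    simp only [List.foldl_nil]
    rw [if_neg (by omega : ¬ (i' < 0 ∧ j' ≤ m))]
  | succ k ihk =>
    obtain ⟨ihs, ihg⟩ := ihk (by omega)
    rw [show (((k + 1 : Nat)) : Int) = (k : Int) + 1 by push_cast; ring,
      PySem.List.pyRange_one_succ_right (by omega : (0 : Int) ≤ (k : Int)),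
      List.foldl_append]
    set D := (PySem.List.pyRange 0 (k : Int) 1).foldl (fun d i =>
      (PySem.List.pyRange 0 (((PySem.List.pyGetD d 0 []).length : Int) - 1) 1).foldl
        (fun d j => pvAdd2 d i (j + 1) (pvGet2 d i j)) d) d with hDdef
    simp only [List.foldl_cons, List.foldl_nil]
    have hbound : ((PySem.List.pyGetD D 0 []).length : Int) - 1 = (m : Int) := by
      rw [PySem.List.pyGetD_of_nonneg D [] (le_refl (0 : Int)),
        show ((0 : Int)).toNat = 0 from rfl,
        pvRow_len D (n + 1) (m + 1) ihs 0 (by omega)]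
      push_cast; ring
    rw [hbound]
    obtain ⟨hs2, hg2⟩ := pvRowIn_get n m (k : Int) (by omega) (by omega)
      m (le_refl m) D ihs
    refine ⟨hs2, fun i' j' => ?_⟩
    rw [hg2 i' j']
    by_cases hik : i' = k
    · by_cases hjm : j' ≤ m
      · rw [if_pos (show i' = ((k : Int)).toNat ∧ j' ≤ m by omega),
          if_pos (show i' < k + 1 ∧ j' ≤ m by omega)]
        refine Finset.sum_congr rfl fun t ht => ?_
        rw [show ((k : Int)).toNat = k from by omega, ihg k t,
          if_neg (by omega : ¬ (k < k ∧ t ≤ m)), hik]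
      · rw [if_neg (by omega : ¬ (i' = ((k : Int)).toNat ∧ j' ≤ m)),
          if_neg (by omega : ¬ (i' < k + 1 ∧ j' ≤ m)),
          ihg i' j', if_neg (by omega : ¬ (i' < k ∧ j' ≤ m))]
    · rw [if_neg (by omega : ¬ (i' = ((k : Int)).toNat ∧ j' ≤ m)), ihg i' j']
      by_cases h2 : i' < k ∧ j' ≤ m
      · rw [if_pos h2, if_pos (show i' < k + 1 ∧ j' ≤ m by omega)]
      · rw [if_neg h2, if_neg (by omega : ¬ (i' < k + 1 ∧ j' ≤ m))]

-- the inner loop of A's column-prefix pass, for a fixed column index j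
theorem pvColIn_get (n m : Nat) (j : Int) (hj : 0 ≤ j) (hj' : j < (m : Int) + 1)
    (k : Nat) (hk : k ≤ n) (d : List (List Int)) (hd : pvShape d (n + 1) (m + 1)) :
    pvShape ((PySem.List.pyRange 0 (k : Int) 1).foldl
      (fun d i => pvAdd2 d (i + 1) j (pvGet2 d i j)) d) (n + 1) (m + 1) ∧
    ∀ i' j' : Nat, pvG ((PySem.List.pyRange 0 (k : Int) 1).foldl
      (fun d i => pvAdd2 d (i + 1) j (pvGet2 d i j)) d) i' j' =
      if j' = j.toNat ∧ i' ≤ k then ∑ t ∈ Finset.range (i' + 1), pvG d t j.toNat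
      else pvG d i' j' := by
  induction k with
  | zero =>
    simp only [Nat.cast_zero]
    rw [PySem.List.pyRange_one_eq_nil (le_refl (0 : Int))]
    refine ⟨hd, fun i' j' => ?_⟩
    simp only [List.foldl_nil]
    split_ifs with h
    · obtain ⟨rfl, hi0⟩ := h
      have hi00 : i' = 0 := by omega
      subst hi00
      simp
    · rfl
  | succ k ihk =>
    obtain ⟨ihs, ihg⟩ := ihk (by omega)
    rw [show (((k + 1 : Nat)) : Int) = (k : Int) + 1 by push_cast; ring,
      PySem.List.pyRange_one_succ_right (by omega : (0 : Int) ≤ (k : Int)),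
      List.foldl_append]
    set D := (PySem.List.pyRange 0 (k : Int) 1).foldl
      (fun d i => pvAdd2 d (i + 1) j (pvGet2 d i j)) d with hDdef
    simp only [List.foldl_cons, List.foldl_nil]
    have hget : pvGet2 D (k : Int) j = pvG D k j.toNat := by
      have := pvGet2_eq D (k : Int) j (by omega) hj
      simpa using this
    have hsh : pvShape (pvAdd2 D ((k : Int) + 1) j (pvGet2 D (k : Int) j)) (n + 1) (m + 1) :=
      pvAdd2_shape D _ _ ihs ((k : Int) + 1) j _ (by omega) (by omega) hj (by omega)
    refine ⟨hsh, fun i' j' => ?_⟩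
    rw [pvAdd2_get D _ _ ihs ((k : Int) + 1) j _ (by omega) (by omega) hj (by omega) i' j']
    have hval : pvG D k j.toNat = ∑ t ∈ Finset.range (k + 1), pvG d t j.toNat := by
      rw [ihg k j.toNat, if_pos (show j.toNat = j.toNat ∧ k ≤ k from ⟨rfl, le_refl k⟩)]
    rw [hget, hval, ihg i' j']
    by_cases hj'' : j' = j.toNat
    · by_cases hi1 : i' = k + 1
      · rw [if_neg (by omega : ¬ (j' = j.toNat ∧ i' ≤ k)),
          if_pos (show ((i' : Nat) : Int) = (k : Int) + 1 ∧ ((j' : Nat) : Int) = j by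
            constructor <;> omega),
          if_pos (show j' = j.toNat ∧ i' ≤ k + 1 by omega),
          hj'', hi1,
          show ∑ t ∈ Finset.range (k + 1 + 1), pvG d t j.toNat =
              (∑ t ∈ Finset.range (k + 1), pvG d t j.toNat) + pvG d (k + 1) j.toNat
            from Finset.sum_range_succ _ _]
        ring
      · by_cases hi2 : i' ≤ k
        · rw [if_pos (show j' = j.toNat ∧ i' ≤ k from ⟨hj'', hi2⟩),
            if_pos (show j' = j.toNat ∧ i' ≤ k + 1 by omega),
            if_neg (by omega : ¬ (((i' : Nat) : Int) = (k : Int) + 1 ∧ ((j' : Nat) : Int) = j))]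
          ring
        · rw [if_neg (by omega : ¬ (j' = j.toNat ∧ i' ≤ k)),
            if_neg (by omega : ¬ (j' = j.toNat ∧ i' ≤ k + 1)),
            if_neg (by omega : ¬ (((i' : Nat) : Int) = (k : Int) + 1 ∧ ((j' : Nat) : Int) = j))]
          ring
    · rw [if_neg (by omega : ¬ (j' = j.toNat ∧ i' ≤ k)),
        if_neg (by omega : ¬ (j' = j.toNat ∧ i' ≤ k + 1)),
        if_neg (by omega : ¬ (((i' : Nat) : Int) = (k : Int) + 1 ∧ ((j' : Nat) : Int) = j))]
      ring

-- the outer loop of A's column-prefix pass: columns 0..k-1 become column-prefix sums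
theorem pvColOut_get (n m : Nat) (k : Nat) (hk : k ≤ m) (d : List (List Int))
    (hd : pvShape d (n + 1) (m + 1)) :
    pvShape ((PySem.List.pyRange 0 (k : Int) 1).foldl (fun d j =>
      (PySem.List.pyRange 0 ((d.length : Int) - 1) 1).foldl
        (fun d i => pvAdd2 d (i + 1) j (pvGet2 d i j)) d) d) (n + 1) (m + 1) ∧
    ∀ i' j' : Nat, pvG ((PySem.List.pyRange 0 (k : Int) 1).foldl (fun d j =>
      (PySem.List.pyRange 0 ((d.length : Int) - 1) 1).foldl
        (fun d i => pvAdd2 d (i + 1) j (pvGet2 d i j)) d) d) i' j' =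
      if j' < k ∧ i' ≤ n then ∑ t ∈ Finset.range (i' + 1), pvG d t j'
      else pvG d i' j' := by
  induction k with
  | zero =>
    simp only [Nat.cast_zero]
    rw [PySem.List.pyRange_one_eq_nil (le_refl (0 : Int))]
    refine ⟨hd, fun i' j' => ?_⟩
    simp only [List.foldl_nil]
    rw [if_neg (by omega : ¬ (j' < 0 ∧ i' ≤ n))]
  | succ k ihk =>
    obtain ⟨ihs, ihg⟩ := ihk (by omega)
    rw [show (((k + 1 : Nat)) : Int) = (k : Int) + 1 by push_cast; ring,
      PySem.List.pyRange_one_succ_right (by omega : (0 : Int) ≤ (k : Int)),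
      List.foldl_append]
    set D := (PySem.List.pyRange 0 (k : Int) 1).foldl (fun d j =>
      (PySem.List.pyRange 0 ((d.length : Int) - 1) 1).foldl
        (fun d i => pvAdd2 d (i + 1) j (pvGet2 d i j)) d) d with hDdef
    simp only [List.foldl_cons, List.foldl_nil]
    have hbound : ((D.length : Int)) - 1 = (n : Int) := by
      rw [ihs.1]; push_cast; ring
    rw [hbound]
    obtain ⟨hs2, hg2⟩ := pvColIn_get n m (k : Int) (by omega) (by omega)
      n (le_refl n) D ihs
    refine ⟨hs2, fun i' j' => ?_⟩
    rw [hg2 i' j']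
    by_cases hjk : j' = k
    · by_cases him : i' ≤ n
      · rw [if_pos (show j' = ((k : Int)).toNat ∧ i' ≤ n by omega),
          if_pos (show j' < k + 1 ∧ i' ≤ n by omega)]
        refine Finset.sum_congr rfl fun t ht => ?_
        rw [show ((k : Int)).toNat = k from by omega, ihg t k,
          if_neg (by omega : ¬ (k < k ∧ t ≤ n)), hjk]
      · rw [if_neg (by omega : ¬ (j' = ((k : Int)).toNat ∧ i' ≤ n)),
          if_neg (by omega : ¬ (j' < k + 1 ∧ i' ≤ n)),
          ihg i' j', if_neg (by omega : ¬ (j' < k ∧ i' ≤ n))]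
    · rw [if_neg (by omega : ¬ (j' = ((k : Int)).toNat ∧ i' ≤ n)), ihg i' j']
      by_cases h2 : j' < k ∧ i' ≤ n
      · rw [if_pos h2, if_pos (show j' < k + 1 ∧ i' ≤ n by omega)]
      · rw [if_neg h2, if_neg (by omega : ¬ (j' < k + 1 ∧ i' ≤ n))]

theorem pvListSumComm {α γ : Type} (l : List α) (s : Finset γ) (f : γ → α → Int) :
    ∑ x ∈ s, (l.map (f x)).sum = (l.map (fun a => ∑ x ∈ s, f x a)).sum := by
  induction l with
  | nil => simp
  | cons a t ih => simp [List.map_cons, List.sum_cons, Finset.sum_add_distrib, ih]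

theorem pvSumFour (sk : List Int) (n m : Nat) (hsk : pvSkOK sk n m) (i j : Nat)
    (hi : i < n) (hj : j < m) :
    ∑ t ∈ Finset.range (i + 1), ∑ u ∈ Finset.range (j + 1), pvFour sk t u =
      pvRect sk (i : Int) (j : Int) := by
  obtain ⟨hlen, h1, h2, h3, h4, h5, h6⟩ := hsk
  match sk, hlen with
  | [t, r1, c1, r2, c2, deg], _ =>
    rw [show [t, r1, c1, r2, c2, deg].getD 1 0 = r1 from rfl] at h1 h2
    rw [show [t, r1, c1, r2, c2, deg].getD 3 0 = r2 from rfl] at h2 h3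
    rw [show [t, r1, c1, r2, c2, deg].getD 2 0 = c1 from rfl] at h4 h5
    rw [show [t, r1, c1, r2, c2, deg].getD 4 0 = c2 from rfl] at h5 h6
    simp only [pvFour, pvRect, pvSigned]
    have hcol : ∑ u ∈ Finset.range (j + 1),
        ((if (u : Int) = c1 then (1 : Int) else 0) - (if (u : Int) = c2 + 1 then 1 else 0)) =
        if c1 ≤ (j : Int) ∧ (j : Int) ≤ c2 then 1 else 0 := by
      rw [Finset.sum_sub_distrib]
      have a1 : ∑ u ∈ Finset.range (j + 1), (if (u : Int) = c1 then (1 : Int) else 0) =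
          if c1.toNat ∈ Finset.range (j + 1) then 1 else 0 := by
        rw [← Finset.sum_ite_eq' (Finset.range (j + 1)) c1.toNat (fun _ => (1 : Int))]
        refine Finset.sum_congr rfl fun u _ => ?_
        have hiff : ((u : Int) = c1) ↔ (u = c1.toNat) := by omega
        simp only [hiff]
      have a2 : ∑ u ∈ Finset.range (j + 1), (if (u : Int) = c2 + 1 then (1 : Int) else 0) =
          if (c2 + 1).toNat ∈ Finset.range (j + 1) then 1 else 0 := by
        rw [← Finset.sum_ite_eq' (Finset.range (j + 1)) (c2 + 1).toNat (fun _ => (1 : Int))]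
        refine Finset.sum_congr rfl fun u _ => ?_
        have hiff : ((u : Int) = c2 + 1) ↔ (u = (c2 + 1).toNat) := by omega
        simp only [hiff]
      rw [a1, a2]
      simp only [Finset.mem_range]
      split_ifs <;> omega
    have hrow : ∑ t' ∈ Finset.range (i + 1),
        ((if (t' : Int) = r1 then (1 : Int) else 0) - (if (t' : Int) = r2 + 1 then 1 else 0)) =
        if r1 ≤ (i : Int) ∧ (i : Int) ≤ r2 then 1 else 0 := by
      rw [Finset.sum_sub_distrib]
      have a1 : ∑ t' ∈ Finset.range (i + 1), (if (t' : Int) = r1 then (1 : Int) else 0) =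
          if r1.toNat ∈ Finset.range (i + 1) then 1 else 0 := by
        rw [← Finset.sum_ite_eq' (Finset.range (i + 1)) r1.toNat (fun _ => (1 : Int))]
        refine Finset.sum_congr rfl fun t' _ => ?_
        have hiff : ((t' : Int) = r1) ↔ (t' = r1.toNat) := by omega
        simp only [hiff]
      have a2 : ∑ t' ∈ Finset.range (i + 1), (if (t' : Int) = r2 + 1 then (1 : Int) else 0) =
          if (r2 + 1).toNat ∈ Finset.range (i + 1) then 1 else 0 := by
        rw [← Finset.sum_ite_eq' (Finset.range (i + 1)) (r2 + 1).toNat (fun _ => (1 : Int))]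
        refine Finset.sum_congr rfl fun t' _ => ?_
        have hiff : ((t' : Int) = r2 + 1) ↔ (t' = (r2 + 1).toNat) := by omega
        simp only [hiff]
      rw [a1, a2]
      simp only [Finset.mem_range]
      split_ifs <;> omega
    calc
      ∑ t' ∈ Finset.range (i + 1), ∑ u ∈ Finset.range (j + 1),
          (if t == 2 then deg else -deg) *
            ((if (t' : Int) = r1 then (1:Int) else 0) - (if (t' : Int) = r2 + 1 then 1 else 0)) *
            ((if (u : Int) = c1 then (1:Int) else 0) - (if (u : Int) = c2 + 1 then 1 else 0))
        = ∑ t' ∈ Finset.range (i + 1),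
            ((if t == 2 then deg else -deg) *
              ((if (t' : Int) = r1 then (1:Int) else 0) - (if (t' : Int) = r2 + 1 then 1 else 0)) *
              ∑ u ∈ Finset.range (j + 1),
                ((if (u : Int) = c1 then (1:Int) else 0) - (if (u : Int) = c2 + 1 then 1 else 0))) :=
          Finset.sum_congr rfl fun t' _ => (Finset.mul_sum _ _ _).symm
      _ = ∑ t' ∈ Finset.range (i + 1),
            ((if t == 2 then deg else -deg) * (if c1 ≤ (j : Int) ∧ (j : Int) ≤ c2 then 1 else 0) *
              ((if (t' : Int) = r1 then (1:Int) else 0) - (if (t' : Int) = r2 + 1 then 1 else 0))) := by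
          rw [hcol]; exact Finset.sum_congr rfl fun t' _ => by ring
      _ = (if t == 2 then deg else -deg) * (if c1 ≤ (j : Int) ∧ (j : Int) ≤ c2 then 1 else 0) *
            (if r1 ≤ (i : Int) ∧ (i : Int) ≤ r2 then 1 else 0) := by
          rw [← Finset.mul_sum, hrow]
      _ = if r1 ≤ (i : Int) ∧ (i : Int) ≤ r2 ∧ c1 ≤ (j : Int) ∧ (j : Int) ≤ c2
            then (if t == 2 then deg else -deg) else 0 := by
          by_cases hA : r1 ≤ (i : Int) <;> by_cases hB : (i : Int) ≤ r2 <;>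
            by_cases hC : c1 ≤ (j : Int) <;> by_cases hD : (j : Int) ≤ c2 <;>
            simp [hA, hB, hC, hD]

theorem pvAltTotal (skill : List (List Int)) (i j : Int) (b0 : Int) :
    (skill.map pvSigned).foldl (fun tot q =>
      if q.2.1 ≤ i ∧ i ≤ q.2.2.2.1 ∧ q.2.2.1 ≤ j ∧ j ≤ q.2.2.2.2
      then tot + q.1 else tot) b0 =
    b0 + (skill.map (fun sk => pvRect sk i j)).sum := by
  induction skill generalizing b0 with
  | nil => simp
  | cons a l ih =>
    simp only [List.map_cons, List.foldl_cons, List.sum_cons]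
    rw [ih]
    simp only [pvRect]
    split_ifs <;> ring

theorem solution_eq (board skill : List (List Int)) (hne : board ≠ [])
    (hskOK : ∀ sk ∈ skill, pvSkOK sk board.length (board.headD []).length) :
    solution board skill = solution_alt board skill := by
  have hb0 : PySem.List.pyGetD board 0 [] = board.headD [] := by
    rw [PySem.List.pyGetD_zero]
    cases board with
    | nil => exact absurd rfl hne
    | cons a t => rfl
  simp only [solution, solution_alt, hb0]
  set n := board.length with hn
  set m := (board.headD []).length with hm
  have hd0 : pvShape (List.replicate (n + 1) (List.replicate (m + 1) (0 : Int))) (n + 1) (m + 1) := by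
    constructor
    · simp
    · intro r hr
      rw [List.eq_of_mem_replicate hr]
      simp
  have hG0 : ∀ i j : Nat, pvG (List.replicate (n + 1) (List.replicate (m + 1) (0 : Int))) i j = 0 := by
    intro i j
    unfold pvG
    have h1 : (List.replicate (n + 1) (List.replicate (m + 1) (0 : Int))).getD i [] =
        List.replicate (m + 1) (0 : Int) ∨
        (List.replicate (n + 1) (List.replicate (m + 1) (0 : Int))).getD i [] = [] := by
      rcases Nat.lt_or_ge i (n + 1) with h | h
      · left
        rw [List.getD_eq_getElem?_getD, List.getElem?_replicate_of_lt h, Option.getD_some]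
      · right
        rw [List.getD_eq_getElem?_getD, List.getElem?_eq_none (by simpa using h), Option.getD_none]
    rcases h1 with h1 | h1 <;> rw [h1] <;>
      simp [List.getD_eq_getElem?_getD, List.getElem?_replicate] <;>
      first | rfl | (split_ifs <;> rfl)
  obtain ⟨hs1, hg1⟩ := pvFold_skill skill n m hskOK _ hd0
  set d1 := skill.foldl pvApplySkill (List.replicate (n + 1) (List.replicate (m + 1) (0 : Int))) with hd1
  have hg1' : ∀ i j : Nat, pvG d1 i j = (skill.map (fun sk => pvFour sk i j)).sum := by
    intro i j
    rw [hg1 i j, hG0 i j, zero_add]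
  have hlen1 : ((d1.length : Int)) - 1 = (n : Int) := by rw [hs1.1]; push_cast; ring
  rw [hlen1]
  obtain ⟨hs2, hg2⟩ := pvRowOut_get n m n (le_refl n) d1 hs1
  set d2 := (PySem.List.pyRange 0 (n : Int) 1).foldl (fun d i =>
      (PySem.List.pyRange 0 (((PySem.List.pyGetD d 0 []).length : Int) - 1) 1).foldl
        (fun d j => pvAdd2 d i (j + 1) (pvGet2 d i j)) d) d1 with hd2
  have hb2 : ((PySem.List.pyGetD d2 0 []).length : Int) - 1 = (m : Int) := by
    rw [PySem.List.pyGetD_of_nonneg d2 [] (le_refl (0 : Int)),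
      show ((0 : Int)).toNat = 0 from rfl,
      pvRow_len d2 (n + 1) (m + 1) hs2 0 (by omega)]
    push_cast; ring
  rw [hb2]
  obtain ⟨hs3, hg3⟩ := pvColOut_get n m m (le_refl m) d2 hs2
  set d3 := (PySem.List.pyRange 0 (m : Int) 1).foldl (fun d j =>
      (PySem.List.pyRange 0 ((d.length : Int) - 1) 1).foldl
        (fun d i => pvAdd2 d (i + 1) j (pvGet2 d i j)) d) d2 with hd3
  have hcell : ∀ i j : Nat, i < n → j < m →
      pvG d3 i j = (skill.map (fun sk => pvRect sk (i : Int) (j : Int))).sum := by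
    intro i j hi hj
    rw [hg3 i j, if_pos ⟨hj, by omega⟩]
    rw [Finset.sum_congr rfl (fun t ht => by
      rw [hg2 t j, if_pos (show t < n ∧ j ≤ m by
        simp only [Finset.mem_range] at ht; omega)])]
    rw [Finset.sum_congr rfl (fun t _ => Finset.sum_congr rfl (fun u _ => hg1' t u))]
    rw [Finset.sum_congr rfl (fun t _ =>
      pvListSumComm skill (Finset.range (j + 1)) (fun u sk => pvFour sk t u))]
    rw [pvListSumComm skill (Finset.range (i + 1)) (fun t sk =>
      ∑ u ∈ Finset.range (j + 1), pvFour sk t u)]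
    exact congrArg List.sum
      (List.map_congr_left fun sk hsk => pvSumFour sk n m (hskOK sk hsk) i j hi hj)
  apply PySem.List.foldl_congr_mem
  intro acc i hi
  apply PySem.List.foldl_congr_mem
  intro acc2 j hj
  rw [PySem.List.mem_pyRange_one] at hi hj
  rw [pvAltTotal skill i j (PySem.List.pyGetD (PySem.List.pyGetD board i []) j 0)]
  rw [pvGet2_eq d3 i j hi.1 hj.1]
  rw [hcell i.toNat j.toNat (by omega) (by omega)]
  simp only [Int.toNat_of_nonneg hi.1, Int.toNat_of_nonneg hj.1]

-- ===== VERDICT (by name: the statement is the Claim_ definition above) =====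
theorem solution_spec : Claim_equal_solution := by
  intro board skill _ hpre
  obtain ⟨hne, _hrows, hsk⟩ := hpre
  unfold Spec_solution
  exact solution_eq board skill hne (fun sk h => hsk sk h)
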